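-- pv_equiv track=rewrite | github.com/wooodyyan/EA_rpg_game | EA_RPG_GAME/rpg_python_game_v6_export_maps_v2.py | seed_center_with_grass
-- ===== SOURCE A (Python) =====
-- CENTER_ZONE_RADIUS = 3  # force center to grass
--
-- def seed_center_with_grass(map_data, radius=CENTER_ZONE_RADIUS):
--     rows = len(map_data)
--     cols = len(map_data[0])
--     mid_r = rows//2
--     mid_c = cols//2
--     r_min = max(mid_r - radius, 0)
--     r_max = min(mid_r + radius, rows-1)
--     c_min = max(mid_c - radius, 0)
--     c_max = min(mid_c + radius, cols-1)
--
--     new_map = []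
--     for r in range(rows):
--         row_list = list(map_data[r])
--         for c in range(cols):
--             if r_min <= r <= r_max and c_min <= c <= c_max:
--                 row_list[c] = '2'
--         new_map.append("".join(row_list))
--     return new_map
-- ===== SOURCE B (Python) =====
-- CENTER_ZONE_RADIUS = 3  # force center to grass
--
-- def seed_center_with_grass(map_data, radius=CENTER_ZONE_RADIUS):
--     rows = len(map_data)
--     cols = len(map_data[0])
--     r_min = max(rows // 2 - radius, 0)
--     r_max = min(rows // 2 + radius, rows - 1)
--     c_min = max(cols // 2 - radius, 0)
--     c_max = min(cols // 2 + radius, cols - 1)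
--     band = '2' * (c_max - c_min + 1)
--     new_map = list(map_data)
--     for r in range(r_min, r_max + 1):
--         row = new_map[r]
--         new_map[r] = row[:c_min] + band + row[c_max + 1:]
--     return new_map
-- ===== Notes on version B (the rewrite author's own statement) =====
-- stated objective: faster
-- what changed: A rebuilds every row and visits every cell with an inner loop and a per-cell branch; B copies the list once and then loops only over the band rows range(r_min, r_max+1), replacing each by a single slice-splice row[:c_min] + '2'*width + row[c_max+1:], so rows outside the band are never rebuilt and no per-cell work is done.
import Mathlib
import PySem

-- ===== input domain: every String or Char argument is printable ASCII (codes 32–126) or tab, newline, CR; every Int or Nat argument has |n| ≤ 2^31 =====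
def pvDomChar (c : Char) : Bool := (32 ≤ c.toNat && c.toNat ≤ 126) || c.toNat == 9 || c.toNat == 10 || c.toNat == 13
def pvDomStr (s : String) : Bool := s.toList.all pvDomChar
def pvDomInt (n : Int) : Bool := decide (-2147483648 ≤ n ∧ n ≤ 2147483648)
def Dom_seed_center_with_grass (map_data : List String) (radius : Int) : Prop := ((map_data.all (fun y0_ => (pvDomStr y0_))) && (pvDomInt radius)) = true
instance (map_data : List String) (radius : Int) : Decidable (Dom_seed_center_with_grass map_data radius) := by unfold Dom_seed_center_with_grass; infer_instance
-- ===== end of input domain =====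

-- B copies the list once and then rewrites ONLY the (2*radius+1) band rows with one slice-splice each, instead of A's per-cell loop over every row; A raises on empty/short-band-row maps, excluded by Pre_; return value only.


-- ===== PORT A =====
def seed_center_with_grass (map_data : List String) (radius : Int) : List String :=
  let rows : Int := map_data.length
  let cols : Int := (((PySem.List.pyGet? map_data 0).getD "").toList.length : Int)  -- map_data[0] raises on []; Pre_ excludes that
  let mid_r : Int := PySem.Int.floordiv rows 2
  let mid_c : Int := PySem.Int.floordiv cols 2
  let r_min : Int := max (mid_r - radius) 0
  let r_max : Int := min (mid_r + radius) (rows - 1)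
  let c_min : Int := max (mid_c - radius) 0
  let c_max : Int := min (mid_c + radius) (cols - 1)
  (PySem.List.pyRange 0 rows 1).foldl (fun new_map r =>
    let row_list := ((PySem.List.pyGet? map_data r).getD "").toList
    let row_list := (PySem.List.pyRange 0 cols 1).foldl (fun rl c =>
      if r_min ≤ r ∧ r ≤ r_max ∧ c_min ≤ c ∧ c ≤ c_max then
        PySem.List.pySetD rl c '2'   -- row_list[c] = '2' raises out of range; Pre_ excludes that
      else rl) row_list
    new_map ++ [String.ofList row_list]) []

-- ===== PORT B =====
def seed_center_with_grass_alt (map_data : List String) (radius : Int) : List String :=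
  let rows : Int := map_data.length
  let cols : Int := (((PySem.List.pyGet? map_data 0).getD "").toList.length : Int)
  let r_min : Int := max (PySem.Int.floordiv rows 2 - radius) 0
  let r_max : Int := min (PySem.Int.floordiv rows 2 + radius) (rows - 1)
  let c_min : Int := max (PySem.Int.floordiv cols 2 - radius) 0
  let c_max : Int := min (PySem.Int.floordiv cols 2 + radius) (cols - 1)
  let band : List Char := PySem.List.pyRepeat ['2'] (c_max - c_min + 1)   -- '2' * (c_max - c_min + 1)
  -- new_map = list(map_data); for r in range(r_min, r_max+1): new_map[r] = row[:c_min] + band + row[c_max+1:]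
  (PySem.List.pyRange r_min (r_max + 1) 1).foldl (fun nm r =>
    let row := ((PySem.List.pyGet? nm r).getD "").toList
    PySem.List.pySetD nm r
      (String.ofList (PySem.List.slice row none (some c_min) ++ band ++
                      PySem.List.slice row (some (c_max + 1)) none))) map_data

-- ===== PRECONDITION & SPEC =====
-- helper values for Pre_ (the same bound arithmetic as the Python, written without touching the ports)
def pvRmin (map_data : List String) (radius : Int) : Int :=
  max (PySem.Int.floordiv (map_data.length : Int) 2 - radius) 0
def pvRmax (map_data : List String) (radius : Int) : Int :=
  min (PySem.Int.floordiv (map_data.length : Int) 2 + radius) ((map_data.length : Int) - 1)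
def pvCols (map_data : List String) : Int := ((map_data.headD "").toList.length : Int)
def pvCmax (map_data : List String) (radius : Int) : Int :=
  min (PySem.Int.floordiv (pvCols map_data) 2 + radius) (pvCols map_data - 1)

-- Pre_ excludes exactly the inputs where the Python A raises IndexError: the empty map, and maps where
-- some row inside the center row band has fewer than c_max+1 characters (the cell assignment goes out of range).
def Pre_seed_center_with_grass (map_data : List String) (radius : Int) : Prop :=
  map_data ≠ [] ∧
  ∀ i : Nat, (h : i < map_data.length) →
    (pvRmin map_data radius ≤ (i : Int) ∧ (i : Int) ≤ pvRmax map_data radius) →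
    pvCmax map_data radius < (map_data[i].toList.length : Int)
instance (map_data : List String) (radius : Int) : Decidable (Pre_seed_center_with_grass map_data radius) := by
  unfold Pre_seed_center_with_grass; infer_instance

def pvWitness_seed_center_with_grass : List String × Int := (["aaa", "bbb", "ccc"], 1)

def Spec_seed_center_with_grass (map_data : List String) (radius : Int) (out : List String) : Prop :=
  out = seed_center_with_grass_alt map_data radius
instance (map_data : List String) (radius : Int) (out : List String) : Decidable (Spec_seed_center_with_grass map_data radius out) := by
  unfold Spec_seed_center_with_grass; infer_instance

-- ===== CLAIM (what is proved, stated in full; the proofs are below) =====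
def Claim_equal_seed_center_with_grass : Prop := ∀ (map_data : List String) (radius : Int), Dom_seed_center_with_grass map_data radius → Pre_seed_center_with_grass map_data radius → Spec_seed_center_with_grass map_data radius (seed_center_with_grass map_data radius)

-- ===== LEMMAS AND PROOFS =====

-- a fold whose step never changes the accumulator on the traversed list is the identity
theorem pv_foldl_id {α β : Type} (L : List β) (f : List α → β → List α) (x : List α)
    (hf : ∀ rl c, c ∈ L → f rl c = rl) : L.foldl f x = x := by
  induction L generalizing x with
  | nil => rfl
  | cons c L ih =>
    rw [List.foldl_cons, hf x c (by simp)]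
    exact ih x fun rl c' hc' => hf rl c' (by simp [hc'])

-- setting the consecutive indices [a, a+n) of l to '2' = take ++ replicate ++ drop
theorem pv_setRange (n : Nat) : ∀ (l : List Char) (a : Int), 0 ≤ a → a + n ≤ (l.length : Int) →
    (PySem.List.pyRange a (a + n) 1).foldl (fun rl c => PySem.List.pySetD rl c '2') l
      = l.take a.toNat ++ List.replicate n '2' ++ l.drop (a + n).toNat := by
  induction n with
  | zero =>
    intro l a ha _
    rw [PySem.List.pyRange_one_eq_nil (by omega)]
    simp [List.take_append_drop]
  | succ n ih =>
    intro l a ha hlen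
    have e : a + ((n + 1 : Nat) : Int) = a + 1 + (n : Int) := by push_cast; ring
    rw [e] at hlen ⊢
    rw [PySem.List.pyRange_one_cons (by omega), List.foldl_cons,
        PySem.List.pySetD_of_nonneg l '2' ha]
    have hA : a.toNat < l.length := by omega
    rw [ih (l.set a.toNat '2') (a + 1) (by omega) (by rw [List.length_set]; omega)]
    have h1 : (a + 1).toNat = a.toNat + 1 := by omega
    have h2 : a.toNat < (a + 1 + (n : Int)).toNat := by omega
    rw [List.take_set, h1, List.take_add_one, List.getElem?_eq_getElem hA,
        List.drop_set, if_pos h2, List.set_append]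
    simp [List.length_take, List.replicate_succ, List.append_assoc,
          Nat.min_eq_left (le_of_lt hA)]

-- one band row of A's inner loop, as a take/replicate/drop splice
theorem pv_row_band (l : List Char) (cmin cmax cols : Int)
    (h0 : 0 ≤ cmin) (h1 : cmin ≤ cmax + 1) (h2 : cmax < cols) (h3 : cmax < (l.length : Int)) :
    (PySem.List.pyRange 0 cols 1).foldl
        (fun rl c => if cmin ≤ c ∧ c ≤ cmax then PySem.List.pySetD rl c '2' else rl) l
      = l.take cmin.toNat ++ List.replicate (cmax - cmin + 1).toNat '2' ++ l.drop (cmax + 1).toNat := by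
  rw [PySem.List.pyRange_one_append 0 cmin cols (by omega) (by omega), List.foldl_append,
      pv_foldl_id (PySem.List.pyRange 0 cmin 1) _ l
        (by intro rl c hc; rw [PySem.List.mem_pyRange_one] at hc; rw [if_neg]; omega),
      PySem.List.pyRange_one_append cmin (cmax + 1) cols (by omega) (by omega), List.foldl_append,
      PySem.List.foldl_congr_mem (PySem.List.pyRange cmin (cmax + 1) 1) _
        (fun rl c => PySem.List.pySetD rl c '2') l
        (by intro acc c hc; rw [PySem.List.mem_pyRange_one] at hc; rw [if_pos]; omega)]
  have e : cmax + 1 = cmin + ((cmax - cmin + 1).toNat : Int) := by omega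
  rw [e, pv_setRange (cmax - cmin + 1).toNat l cmin h0 (by omega)]
  apply pv_foldl_id
  intro rl c hc
  rw [PySem.List.mem_pyRange_one] at hc
  rw [if_neg]; omega

-- B's loop: setting each index of [a, a+n) to f of the row currently there (indices are distinct
-- and increasing, so each row read is the original one), characterised index-wise
theorem pv_fold_set (cmin cmax : Int) (band : List Char) (md : List String) (n : Nat) :
    ∀ (a : Int) (acc : List String), 0 ≤ a → a + n ≤ (acc.length : Int) →
    (∀ j : Nat, a ≤ (j : Int) → acc[j]? = md[j]?) →
    ∀ i : Nat,
    ((PySem.List.pyRange a (a + n) 1).foldl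
        (fun nm r => PySem.List.pySetD nm r
          (String.ofList (PySem.List.slice ((PySem.List.pyGet? nm r).getD "").toList none (some cmin) ++
            band ++ PySem.List.slice ((PySem.List.pyGet? nm r).getD "").toList (some (cmax + 1)) none))) acc)[i]?
      = if a ≤ (i : Int) ∧ (i : Int) < a + n then
          (md[i]?).map (fun s => String.ofList (PySem.List.slice s.toList none (some cmin) ++
            band ++ PySem.List.slice s.toList (some (cmax + 1)) none))
        else acc[i]? := by
  induction n with
  | zero =>
    intro a acc ha _ _ i
    rw [PySem.List.pyRange_one_eq_nil (by omega), List.foldl_nil, if_neg (by omega)]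
  | succ n ih =>
    intro a acc ha hlen hagree i
    have e : a + ((n + 1 : Nat) : Int) = a + 1 + (n : Int) := by push_cast; ring
    rw [e] at hlen ⊢
    have hA : a.toNat < acc.length := by omega
    rw [PySem.List.pyRange_one_cons (by omega), List.foldl_cons]
    have hget : PySem.List.pyGet? acc a = acc[a.toNat]? := PySem.List.pyGet?_of_nonneg acc ha
    rw [hget, PySem.List.pySetD_of_nonneg acc _ ha]
    have hacc_a : acc[a.toNat]? = md[a.toNat]? := hagree a.toNat (by omega)
    have hmd_a : a.toNat < md.length := by
      by_contra h
      rw [List.getElem?_eq_getElem hA, List.getElem?_eq_none (by omega)] at hacc_a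
      exact Option.some_ne_none _ hacc_a
    rw [ih (a + 1) _ (by omega) (by rw [List.length_set]; omega)
          (by
            intro j hj
            rw [List.getElem?_set_ne (by omega)]
            exact hagree j (by omega))]
    by_cases hmid : a + 1 ≤ (i : Int) ∧ (i : Int) < a + 1 + (n : Int)
    · rw [if_pos hmid, if_pos (by omega)]
    · rw [if_neg hmid]
      by_cases hia : (i : Int) = a
      · have hi : i = a.toNat := by omega
        subst hi
        rw [if_pos (by omega), List.getElem?_set_self (by omega), hacc_a,
            List.getElem?_eq_getElem hmd_a, Option.map_some, Option.getD_some]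
      · rw [if_neg (by omega), List.getElem?_set_ne (by omega)]

-- map_data[0] seen by the ports equals the head used by Pre_, on a non-empty map
theorem pv_cols_eq (md : List String) (h : md ≠ []) :
    ((PySem.List.pyGet? md 0).getD "") = md.headD "" := by
  cases md with
  | nil => exact absurd rfl h
  | cons x xs =>
    rw [show (0 : Int) = ((0 : Nat) : Int) from rfl, PySem.List.pyGet?_natCast]
    rfl

theorem seed_center_with_grass_spec : Claim_equal_seed_center_with_grass := by
  intro md radius _dom hpre
  obtain ⟨hne, hlen⟩ := hpre
  unfold Spec_seed_center_with_grass seed_center_with_grass seed_center_with_grass_alt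
  rw [pv_cols_eq md hne]
  dsimp only
  simp only [PySem.Int.floordiv_eq_ediv_of_pos (by norm_num : (0:Int) < 2)]
  set R : Int := (md.length : Int) with hR
  set C : Int := ((md.headD "").toList.length : Int) with hC
  set rmin := max (R / 2 - radius) 0 with hrmin
  set rmax := min (R / 2 + radius) (R - 1) with hrmax
  set cmin := max (C / 2 - radius) 0 with hcmin
  set cmax := min (C / 2 + radius) (C - 1) with hcmax
  simp only [PySem.List.foldl_append_singleton_eq_map, List.nil_append]
  have e1 : pvRmin md radius = rmin := by
    unfold pvRmin
    rw [PySem.Int.floordiv_eq_ediv_of_pos (by norm_num : (0:Int) < 2), hrmin, hR]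
  have e2 : pvRmax md radius = rmax := by
    unfold pvRmax
    rw [PySem.Int.floordiv_eq_ediv_of_pos (by norm_num : (0:Int) < 2), hrmax, hR]
  have e3 : pvCmax md radius = cmax := by
    unfold pvCmax pvCols
    rw [PySem.Int.floordiv_eq_ediv_of_pos (by norm_num : (0:Int) < 2), hcmax, hC]
  by_cases hbe : rmax + 1 ≤ rmin
  · -- empty row band: B's loop does nothing, A's inner condition never fires
    rw [PySem.List.pyRange_one_eq_nil hbe, List.foldl_nil]
    apply List.ext_getElem?
    intro i
    simp only [List.getElem?_map, PySem.List.getElem?_pyRange_one]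
    have hR0 : (R - 0).toNat = md.length := by omega
    rw [hR0]
    by_cases hi : i < md.length
    · rw [if_pos hi, List.getElem?_eq_getElem hi]
      simp only [Option.map_some, zero_add, Option.some.injEq]
      rw [PySem.List.pyGet?_natCast md i, List.getElem?_eq_getElem hi, Option.getD_some,
          pv_foldl_id _ _ _ (by intro rl c _; rw [if_neg]; intro h; omega),
          String.ofList_toList]
    · rw [if_neg hi, List.getElem?_eq_none (by omega)]
      rfl
  · -- nonempty row band
    have hradius : 0 ≤ radius := by omega
    set n : Nat := (rmax + 1 - rmin).toNat with hn
    have hsum : rmin + (n : Int) = rmax + 1 := by omega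
    rw [← hsum]
    apply List.ext_getElem?
    intro i
    rw [pv_fold_set cmin cmax _ md n rmin md (by omega) (by omega) (fun j _ => rfl) i]
    simp only [List.getElem?_map, PySem.List.getElem?_pyRange_one]
    have hR0 : (R - 0).toNat = md.length := by omega
    rw [hR0]
    by_cases hi : i < md.length
    · rw [if_pos hi]
      simp only [List.getElem?_eq_getElem hi, Option.map_some, zero_add]
      rw [PySem.List.pyGet?_natCast md i, List.getElem?_eq_getElem hi, Option.getD_some]
      by_cases hband : rmin ≤ (i : Int) ∧ (i : Int) ≤ rmax
      · rw [if_pos (by omega : rmin ≤ (i : Int) ∧ (i : Int) < rmin + (n : Int))]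
        have h0 : 0 ≤ cmin := by omega
        have h1 : cmin ≤ cmax + 1 := by omega
        have h2 : cmax < C := by omega
        have h3 : cmax < (md[i].toList.length : Int) := by
          have := hlen i hi (by rw [e1, e2]; exact hband)
          rwa [e3] at this
        rw [PySem.List.foldl_congr_mem _ _
              (fun rl c => if cmin ≤ c ∧ c ≤ cmax then PySem.List.pySetD rl c '2' else rl) _
              (by
                intro acc c _
                dsimp only
                by_cases hcc : cmin ≤ c ∧ c ≤ cmax
                · rw [if_pos ⟨hband.1, hband.2, hcc.1, hcc.2⟩, if_pos hcc]
                · rw [if_neg (by tauto), if_neg hcc])]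
        rw [pv_row_band _ cmin cmax C h0 h1 h2 h3,
            PySem.List.slice_to _ h0, PySem.List.slice_from _ (by omega : (0:Int) ≤ cmax + 1),
            PySem.List.pyRepeat_singleton]
      · rw [if_neg (by omega),
            pv_foldl_id _ _ _
              (by
                intro rl c _
                rw [if_neg]
                intro h
                exact hband ⟨h.1, h.2.1⟩),
            String.ofList_toList]
    · rw [if_neg hi, if_neg (by omega : ¬(rmin ≤ (i : Int) ∧ (i : Int) < rmin + (n : Int))),
          List.getElem?_eq_none (by omega)]
      rfl
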